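-- pv_equiv track=rewrite | github.com/noait2612/university | Year 3/Introduction To Computer Science/Assignments/Exam Prep/2019_A_Aleph.py | make_closed
-- ===== SOURCE A (Python) =====
-- def make_closed(dict1):
--     while True:
--         current_keys = set(dict1.keys())
--         keys_to_remove = []
--         for key, value in dict1.items():
--             if value not in current_keys:
--                 keys_to_remove.append(key)
--         if not keys_to_remove:
--             break
--         for key in keys_to_remove:
--             dict1.pop(key)
--     return dict1
-- ===== SOURCE B (Python) =====
-- def make_closed(dict1):
--     # Worklist cascade: start from the keys whose value is not a key, and
--     # propagate removals backwards through a value -> keys map, instead of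
--     # rescanning to a fixpoint.  Like A, mutates dict1 in place (pops dead keys).
--     keys = set(dict1)
--     preds = {}
--     for k, v in dict1.items():
--         preds.setdefault(v, []).append(k)
--     stack = [k for k, v in dict1.items() if v not in keys]
--     dead = set()
--     while stack:
--         k = stack.pop()
--         if k not in dead:
--             dead.add(k)
--             for p in preds.get(k, []):
--                 if p not in dead:
--                     stack.append(p)
--     for k in dead:
--         dict1.pop(k)
--     return dict1
-- ===== Notes on version B (the rewrite author's own statement) =====
-- stated objective: alternative
-- what changed: A repeatedly rescans the whole dict and rebuilds the key set until a fixpoint is reached; B makes one pass building a reverse value->keys map, seeds a worklist with the keys whose value is not a key, and cascades removals through that map, so each key is processed a bounded number of times.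
import Mathlib
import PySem

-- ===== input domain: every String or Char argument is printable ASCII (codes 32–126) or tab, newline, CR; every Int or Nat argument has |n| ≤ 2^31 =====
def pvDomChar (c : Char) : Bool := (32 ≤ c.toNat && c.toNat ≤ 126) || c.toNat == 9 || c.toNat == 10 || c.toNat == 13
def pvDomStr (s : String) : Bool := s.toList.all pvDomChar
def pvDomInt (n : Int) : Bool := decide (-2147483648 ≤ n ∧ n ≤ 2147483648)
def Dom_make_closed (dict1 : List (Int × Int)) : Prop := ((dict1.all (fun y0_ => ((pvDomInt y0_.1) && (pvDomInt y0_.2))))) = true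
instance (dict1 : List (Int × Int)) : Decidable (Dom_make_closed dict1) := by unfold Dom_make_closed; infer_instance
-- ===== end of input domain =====

-- B replaces A's repeated rescan-to-fixpoint by a worklist cascade over a value->keys map
-- (objective: alternative algorithm of similar cost). Python A mutates dict1 in place and
-- returns it; Python B performs the same in-place pops; the equivalence is about the return.

-- ===== PORT A =====

-- one round of A's scan: keys_to_remove for the current dict
def pvAstep (d : PySem.Dict Int Int) : List Int :=
  let currentKeys : PySem.Set Int := PySem.Set.ofList d.keys
  d.items.foldl (fun acc p => if !currentKeys.contains p.2 then acc ++ [p.1] else acc) []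

lemma pvAstep_eq (l : List (Int × Int)) :
    pvAstep (PySem.Dict.mk l) =
      (l.filter (fun p => !(PySem.Set.ofList (l.map (·.1))).contains p.2)).map (·.1) := by
  simpa [pvAstep, PySem.Dict.keys] using
    PySem.List.foldl_append_if
      (fun pr : Int × Int => !(PySem.Set.ofList (l.map (·.1))).contains pr.2)
      (fun pr : Int × Int => pr.1) l []

lemma pvAstep_mem_iff (l : List (Int × Int)) (k : Int) :
    k ∈ pvAstep (PySem.Dict.mk l) ↔ ∃ p ∈ l, p.1 = k ∧ p.2 ∉ l.map (·.1) := by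
  rw [pvAstep_eq]
  simp [List.mem_map, List.mem_filter, PySem.Set.contains_eq_listContains,
        PySem.Set.mem_ofList]

lemma pvErase_size_le (R : List Int) (d : PySem.Dict Int Int) :
    (R.foldl (fun dd k => dd.erase k) d).size ≤ d.size := by
  induction R generalizing d with
  | nil => simp
  | cons k t ih =>
      simp only [List.foldl_cons]
      refine le_trans (ih _) ?_
      simpa [PySem.Dict.erase, PySem.Dict.size] using List.length_filter_le _ _

lemma pvAloop_dec (d : PySem.Dict Int Int) (h : ¬ pvAstep d = []) :
    ((pvAstep d).foldl (fun dd k => dd.erase k) d).size < d.size := by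
  obtain ⟨k, t, he⟩ := List.exists_cons_of_ne_nil h
  have hk : k ∈ pvAstep d := by rw [he]; exact List.mem_cons_self ..
  obtain ⟨p, hp, hpk, -⟩ := (pvAstep_mem_iff d.items k).mp hk
  rw [he]
  simp only [List.foldl_cons]
  refine lt_of_le_of_lt (pvErase_size_le t _) ?_
  simp only [PySem.Dict.erase, PySem.Dict.size]
  exact List.length_filter_lt_length_iff_exists.mpr ⟨p, hp, by simp [hpk]⟩

-- A's while-loop: rescan, remove, repeat until no key is removed
def pvAloop (d : PySem.Dict Int Int) : PySem.Dict Int Int :=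
  if _h : pvAstep d = [] then d
  else pvAloop ((pvAstep d).foldl (fun dd k => dd.erase k) d)
termination_by d.size
decreasing_by exact pvAloop_dec d _h

def make_closed (dict1 : List (Int × Int)) : List (Int × Int) :=
  (pvAloop (PySem.Dict.ofList dict1)).items

-- ===== PORT B =====

-- generic membership / length facts for the cons-if folds B uses (the Lean-side stack is
-- the reverse of Python's list, so Python's append/pop at the right end is cons/head here)
lemma pvConsIf_mem {α : Type} (P : α → Bool) (f : α → Int) (l : List α) (st : List Int) (y : Int) :
    y ∈ l.foldl (fun s x => if P x then s else f x :: s) st ↔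
      y ∈ st ∨ ∃ x ∈ l, P x = false ∧ f x = y := by
  induction l generalizing st with
  | nil => simp
  | cons a t ih =>
      cases ha : P a <;> simp only [List.foldl_cons, ha, if_true, if_false, Bool.false_eq_true, ih, List.mem_cons] <;> constructor
      · rintro (( rfl | h) | ⟨x, hx, h1, h2⟩)
        · exact Or.inr ⟨a, Or.inl rfl, ha, rfl⟩
        · exact Or.inl h
        · exact Or.inr ⟨x, Or.inr hx, h1, h2⟩
      · rintro (h | ⟨x, (rfl | hx), h1, h2⟩)
        · exact Or.inl (Or.inr h)
        · exact Or.inl (Or.inl h2.symm)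
        · exact Or.inr ⟨x, hx, h1, h2⟩
      · rintro (h | ⟨x, hx, h1, h2⟩)
        · exact Or.inl h
        · exact Or.inr ⟨x, Or.inr hx, h1, h2⟩
      · rintro (h | ⟨x, (rfl | hx), h1, h2⟩)
        · exact Or.inl h
        · rw [ha] at h1; cases h1
        · exact Or.inr ⟨x, hx, h1, h2⟩

lemma pvConsIf_len {α : Type} (P : α → Bool) (f : α → Int) (l : List α) (st : List Int) :
    (l.foldl (fun s x => if P x then s else f x :: s) st).length ≤ st.length + l.length := by
  induction l generalizing st with
  | nil => simp
  | cons a t ih =>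
      simp only [List.foldl_cons]
      by_cases ha : P a
      · simp only [ha, if_true]
        refine le_trans (ih st) ?_
        simp only [List.length_cons]
        omega
      · simp only [ha]
        refine le_trans (ih (f a :: st)) ?_
        simp only [List.length_cons]
        omega

-- preds.get(c, []) is exactly the keys of pairs whose value is c
lemma pvPreds_getD (l : List (Int × Int)) (c : Int) :
    ((l.foldl (fun pr p => pr.modify p.2 [] (· ++ [p.1])) PySem.Dict.empty).getD c []) =
      (l.filter (fun p => p.2 == c)).map (·.1) := by
  have h := PySem.Dict.getD_foldl_modify_append (l.map (fun p => (p.2, p.1)))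
      (PySem.Dict.empty) c
  rw [List.foldl_map] at h
  simpa [List.filter_map, Function.comp] using h

lemma pvPreds_hp (d : PySem.Dict Int Int) (x : Int) :
    ((d.items.foldl (fun pr p => pr.modify p.2 [] (· ++ [p.1])) PySem.Dict.empty).getD x []).length
        ≤ d.keys.length ∧
      ∀ y ∈ (d.items.foldl (fun pr p => pr.modify p.2 [] (· ++ [p.1])) PySem.Dict.empty).getD x [],
        y ∈ d.keys := by
  rw [pvPreds_getD]
  constructor
  · simpa [PySem.Dict.keys] using List.length_filter_le _ d.items
  · intro y hy
    obtain ⟨p, hp, rfl⟩ := List.mem_map.mp hy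
    exact List.mem_map.mpr ⟨p, (List.mem_filter.mp hp).1, rfl⟩

-- B's worklist: pop a key, mark it dead, schedule its predecessors.
-- The invariants carried as hypotheses only serve the termination measure.
def pvBloop (K : List Int) (preds : PySem.Dict Int (List Int))
    (hp : ∀ x : Int, ((preds.getD x []).length ≤ K.length ∧ ∀ y ∈ preds.getD x [], y ∈ K))
    (stack : List Int) (dead : PySem.Set Int)
    (hs : ∀ k ∈ stack, k ∈ K) (hnd : dead.Nodup) (hd : ∀ k ∈ dead, k ∈ K) :
    PySem.Set Int :=
  match stack with
  | [] => dead
  | k :: st =>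
    if hk : dead.contains k then
      pvBloop K preds hp st dead (fun x hx => hs x (List.mem_cons_of_mem _ hx)) hnd hd
    else
      pvBloop K preds hp
        ((preds.getD k []).foldl (fun s p => if (dead.add k).contains p then s else p :: s) st)
        (dead.add k)
        (fun x hx => by
          rcases (pvConsIf_mem (fun p => (dead.add k).contains p) (fun p => p)
              (preds.getD k []) st x).mp hx with h | ⟨z, hz, -, rfl⟩
          · exact hs x (List.mem_cons_of_mem _ h)
          · exact (hp k).2 z hz)
        (PySem.Set.nodup_add _ _ hnd)
        (fun x hx => by
          rcases (PySem.Set.mem_add dead k x).mp hx with h | rfl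
          · exact hd x h
          · exact hs x (List.mem_cons_self ..))
termination_by (K.length + 1 - dead.length) * (K.length + 1) + stack.length
decreasing_by
  · simp only [List.length_cons]; omega
  · have hkm : k ∉ dead := fun hm => hk ((PySem.Set.contains_iff dead k).mpr hm)
    have hlen : (dead.add k).length = dead.length + 1 := by
      rw [PySem.Set.add_of_not_mem hkm]; simp
    have hDK : dead.length + 1 ≤ K.length := by
      have hsub : (dead.add k) ⊆ K := by
        intro x hx
        rcases (PySem.Set.mem_add dead k x).mp hx with h | rfl
        · exact hd x h
        · exact hs x (List.mem_cons_self ..)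
      have := (List.subperm_of_subset (PySem.Set.nodup_add _ _ hnd) hsub).length_le
      omega
    simp only [dite_eq_ite]
    have hpl := pvConsIf_len (fun p => (dead.add k).contains p) (fun p => p)
        (preds.getD k []) st
    have hpk := (hp k).1
    have e1 : K.length + 1 - dead.length = (K.length - dead.length) + 1 := by omega
    have e2 : K.length + 1 - (dead.add k).length = K.length - dead.length := by omega
    rw [e1, e2, List.length_cons]
    have e3 : ((K.length - dead.length) + 1) * (K.length + 1)
        = (K.length - dead.length) * (K.length + 1) + (K.length + 1) := by ring
    rw [e3, Nat.add_assoc]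
    exact Nat.add_lt_add_left (by omega) _

-- dead := the worklist closure of the keys whose value is not a key
def pvBdead (d : PySem.Dict Int Int) : PySem.Set Int :=
  pvBloop d.keys
    -- preds: value -> list of keys carrying that value (setdefault/append loop)
    (d.items.foldl (fun pr p => pr.modify p.2 [] (· ++ [p.1])) PySem.Dict.empty)
    (fun x => pvPreds_hp d x)
    -- stack: keys whose value is not in keys = set(dict1)
    -- (held reversed: Python appends/pops at the right end, this list at the head)
    (d.items.foldl (fun acc p => if (PySem.Set.ofList d.keys).contains p.2 then acc else p.1 :: acc) [])
    PySem.Set.empty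
    (fun k hk => by
      rcases (pvConsIf_mem (fun p : Int × Int => (PySem.Set.ofList d.keys).contains p.2)
          (fun p => p.1) d.items [] k).mp hk with h | ⟨p, hp, -, rfl⟩
      · cases h
      · exact List.mem_map.mpr ⟨p, hp, rfl⟩)
    List.nodup_nil (fun k hk => by cases hk)

def make_closed_alt (dict1 : List (Int × Int)) : List (Int × Int) :=
  let d := PySem.Dict.ofList dict1
  -- for k in dead: dict1.pop(k)   (every dead k is a key, so pop = erase)
  ((pvBdead d).foldl (fun dd k => dd.erase k) d).items

-- ===== PRECONDITION & SPEC =====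
def Spec_make_closed (dict1 : List (Int × Int)) (out : List (Int × Int)) : Prop := out = make_closed_alt dict1
instance (dict1 : List (Int × Int)) (out : List (Int × Int)) : Decidable (Spec_make_closed dict1 out) := by unfold Spec_make_closed; infer_instance

-- ===== CLAIM (what is proved, stated in full; the proofs are below) =====
def Claim_equal_make_closed : Prop := ∀ (dict1 : List (Int × Int)), Dom_make_closed dict1 → Spec_make_closed dict1 (make_closed dict1)

-- ===== LEMMAS AND PROOFS =====

lemma pvPreds_mem (l : List (Int × Int)) (c x : Int) :
    x ∈ ((l.foldl (fun pr p => pr.modify p.2 [] (· ++ [p.1])) PySem.Dict.empty).getD c []) ↔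
      (x, c) ∈ l := by
  rw [pvPreds_getD]
  simp only [List.mem_map, List.mem_filter, beq_iff_eq]
  constructor
  · rintro ⟨p, ⟨hp, rfl⟩, rfl⟩; simpa using hp
  · intro h; exact ⟨(x, c), ⟨h, rfl⟩, rfl⟩

-- a key k is "good" iff it lies in some subset of the keys closed under taking values;
-- both programs keep exactly the good keys
def pvGood (l : List (Int × Int)) (k : Int) : Prop :=
  ∃ T : List Int, (∀ x ∈ T, x ∈ l.map (·.1)) ∧ (∀ p ∈ l, p.1 ∈ T → p.2 ∈ T) ∧ k ∈ T

-- with distinct keys, a pair of l is determined by its key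
lemma pvKeyUniq {l : List (Int × Int)} (hn : (l.map (·.1)).Nodup)
    {p q : Int × Int} (hp : p ∈ l) (hq : q ∈ l) (h : p.1 = q.1) : p = q := by
  induction l with
  | nil => cases hp
  | cons a t ih =>
      simp only [List.map_cons, List.nodup_cons] at hn
      rcases List.mem_cons.mp hp with rfl | hp' <;> rcases List.mem_cons.mp hq with rfl | hq'
      · rfl
      · exact absurd (h ▸ List.mem_map.mpr ⟨q, hq', rfl⟩) hn.1
      · exact absurd (h ▸ List.mem_map.mpr ⟨p, hp', rfl⟩ : q.1 ∈ _) hn.1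
      · exact ih hn.2 hp' hq'

lemma pvErase_foldl_items (R : List Int) (l : List (Int × Int)) :
    ((R.foldl (fun dd k => dd.erase k) (PySem.Dict.mk l))).items
      = l.filter (fun p => !R.contains p.1) := by
  induction R generalizing l with
  | nil => simp
  | cons k t ih =>
      simp only [List.foldl_cons]
      have : (PySem.Dict.mk l).erase k = PySem.Dict.mk (l.filter (fun p => !(p.1 == k))) := rfl
      rw [this, ih, List.filter_filter]
      apply List.filter_congr
      intro p _
      by_cases h1 : p.1 = k <;> by_cases h2 : p.1 ∈ t <;>
        simp [h1, h2]

-- ===== A-side: pvAloop keeps exactly the maximal closed key set =====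

lemma pvAloop_spec_stop (l : List (Int × Int)) (h : pvAstep (PySem.Dict.mk l) = []) :
    ∃ S : List Int,
      (pvAloop (PySem.Dict.mk l)).items = l.filter (fun p => decide (p.1 ∈ S)) ∧
      (∀ k ∈ S, k ∈ l.map (·.1)) ∧
      (∀ p ∈ l, p.1 ∈ S → p.2 ∈ S) ∧
      (∀ T : List Int, (∀ x ∈ T, x ∈ l.map (·.1)) → (∀ p ∈ l, p.1 ∈ T → p.2 ∈ T) →
        ∀ x ∈ T, x ∈ S) := by
  have hclosed : ∀ p ∈ l, p.2 ∈ l.map (·.1) := by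
    intro p hp
    by_contra hc
    have : p.1 ∈ pvAstep (PySem.Dict.mk l) := (pvAstep_mem_iff l p.1).mpr ⟨p, hp, rfl, hc⟩
    rw [h] at this; cases this
  refine ⟨l.map (·.1), ?_, fun k hk => hk, fun p hp _ => hclosed p hp, fun T hT1 _ => hT1⟩
  rw [pvAloop, dif_pos h]
  exact (List.filter_eq_self.mpr (fun p hp => by
    simp only [decide_eq_true_eq]
    exact List.mem_map.mpr ⟨p, hp, rfl⟩)).symm

lemma pvAloop_spec : ∀ (n : ℕ) (l : List (Int × Int)), l.length ≤ n → (l.map (·.1)).Nodup →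
    ∃ S : List Int,
      (pvAloop (PySem.Dict.mk l)).items = l.filter (fun p => decide (p.1 ∈ S)) ∧
      (∀ k ∈ S, k ∈ l.map (·.1)) ∧
      (∀ p ∈ l, p.1 ∈ S → p.2 ∈ S) ∧
      (∀ T : List Int, (∀ x ∈ T, x ∈ l.map (·.1)) → (∀ p ∈ l, p.1 ∈ T → p.2 ∈ T) →
        ∀ x ∈ T, x ∈ S) := by
  intro n
  induction n with
  | zero =>
      intro l hl _
      have : l = [] := by cases l with | nil => rfl | cons a t => simp at hl
      subst this
      exact pvAloop_spec_stop [] (by simp [pvAstep_eq])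
  | succ n ih =>
      intro l hl hn
      by_cases hr : pvAstep (PySem.Dict.mk l) = []
      · exact pvAloop_spec_stop l hr
      · have hitems : (((pvAstep (PySem.Dict.mk l)).foldl (fun dd k => dd.erase k)
            (PySem.Dict.mk l))).items
            = l.filter (fun p => !(pvAstep (PySem.Dict.mk l)).contains p.1) :=
          pvErase_foldl_items _ l
        set R := pvAstep (PySem.Dict.mk l) with hR
        set l' := l.filter (fun p => !R.contains p.1) with hl'
        have hdict : R.foldl (fun dd k => dd.erase k) (PySem.Dict.mk l) = PySem.Dict.mk l' :=
          PySem.Dict.ext hitems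
        have hRchar : ∀ k ∈ R, ∃ p ∈ l, p.1 = k ∧ p.2 ∉ List.map (fun x => x.1) l :=
          fun k hk => (pvAstep_mem_iff l k).mp hk
        have hlt : l'.length < l.length := by
          obtain ⟨k, t, he⟩ := List.exists_cons_of_ne_nil hr
          have hk : k ∈ R := he ▸ List.mem_cons_self ..
          obtain ⟨p, hp, hpk, -⟩ := hRchar k hk
          refine List.length_filter_lt_length_iff_exists.mpr ⟨p, hp, ?_⟩
          simpa [hpk, List.contains_iff_mem] using hk
        have hsubl : l'.Sublist l := by rw [hl']; exact List.filter_sublist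
        have hn' : (l'.map (·.1)).Nodup := hn.sublist (hsubl.map _)
        obtain ⟨S, hS1, hS2, hS3, hS4⟩ := ih l' (by omega) hn'
        have hSnotR : ∀ k ∈ S, k ∉ R := by
          intro k hk hmem
          obtain ⟨q, hq, rfl⟩ := List.mem_map.mp (hS2 k hk)
          have h2 := (List.mem_filter.mp (hl' ▸ hq)).2
          simp [hmem] at h2
        have hmem' : ∀ p ∈ l, p.1 ∈ l'.map (·.1) → p ∈ l' := by
          intro p hp hpm
          obtain ⟨q, hq, hqp⟩ := List.mem_map.mp hpm
          have : q = p := pvKeyUniq hn (hsubl.subset hq) hp hqp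
          exact this ▸ hq
        refine ⟨S, ?_, ?_, ?_, ?_⟩
        · rw [pvAloop, ← hR, dif_neg hr, hdict, hS1, hl', List.filter_filter]
          apply List.filter_congr
          intro p hp
          by_cases hps : p.1 ∈ S
          · have h1 : p.1 ∉ R := hSnotR _ hps
            simp [hps, h1]
          · simp [hps]
        · intro k hk
          exact (hsubl.map (·.1)).subset (hS2 k hk)
        · intro p hp hps
          exact hS3 p (hmem' p hp (hS2 _ hps)) hps
        · intro T hT1 hT2
          have hTR : ∀ x ∈ T, x ∉ R := by
            intro x hx hxR
            obtain ⟨p, hp, rfl, hnk⟩ := hRchar x hxR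
            exact hnk (hT1 _ (hT2 p hp hx))
          refine hS4 T ?_ ?_
          · intro x hx
            obtain ⟨p, hp, rfl⟩ := List.mem_map.mp (hT1 x hx)
            have hpl' : p ∈ l' := by
              refine List.mem_filter.mpr ⟨hp, ?_⟩
              simp only [Bool.not_eq_true']
              rw [← Bool.not_eq_true, List.contains_iff_mem]
              exact hTR _ hx
            exact List.mem_map.mpr ⟨p, hpl', rfl⟩
          · intro p hp hpt
            exact hT2 p (hsubl.subset hp) hpt

-- ===== B-side: the worklist kills exactly the keys outside every closed set =====
lemma pvBloop_spec (l : List (Int × Int)) (K : List Int) (preds : PySem.Dict Int (List Int))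
    (hp : ∀ x : Int, ((preds.getD x []).length ≤ K.length ∧ ∀ y ∈ preds.getD x [], y ∈ K))
    (hpreds : ∀ c x, x ∈ preds.getD c [] ↔ (x, c) ∈ l) :
    ∀ (stack : List Int) (dead : PySem.Set Int) hs hnd hd,
    (∀ k ∈ dead, ¬ pvGood l k) →
    (∀ k ∈ stack, ¬ pvGood l k) →
    (∀ p ∈ l, (p.2 ∉ K ∨ p.2 ∈ dead) → (p.1 ∈ dead ∨ p.1 ∈ stack)) →
    (∀ k ∈ pvBloop K preds hp stack dead hs hnd hd, ¬ pvGood l k) ∧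
    (∀ p ∈ l, (p.2 ∉ K ∨ p.2 ∈ pvBloop K preds hp stack dead hs hnd hd) →
      p.1 ∈ pvBloop K preds hp stack dead hs hnd hd) := by
  intro stack dead hs hnd hd
  fun_induction pvBloop K preds hp stack dead hs hnd hd with
  | case1 dead hnd hd hs1 hs2 =>
      intro I1 _ I3
      exact ⟨I1, fun p hp' hor => (I3 p hp' hor).resolve_right (fun hx => by cases hx)⟩
  | case2 dead hnd hd k st hs1 hk hs2 ih =>
      intro I1 I2 I3
      have hkd : k ∈ dead := (PySem.Set.contains_iff dead k).mp hk
      refine ih I1 (fun x hx => I2 x (List.mem_cons_of_mem _ hx)) ?_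
      intro p hp' hor
      rcases I3 p hp' hor with h | h
      · exact Or.inl h
      · rcases List.mem_cons.mp h with rfl | h'
        · exact Or.inl hkd
        · exact Or.inr h'
  | case3 dead hnd hd k st hs1 hk hs2 ih =>
      intro I1 I2 I3
      have hGk : ¬ pvGood l k := I2 k (List.mem_cons_self ..)
      have nI1 : ∀ x ∈ dead.add k, ¬ pvGood l x := by
        intro x hx
        rcases (PySem.Set.mem_add dead k x).mp hx with h | rfl
        · exact I1 x h
        · exact hGk
      have nI2 : ∀ x ∈ (preds.getD k []).foldl
          (fun s p => if (dead.add k).contains p then s else p :: s) st, ¬ pvGood l x := by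
        intro x hx
        rcases (pvConsIf_mem (fun p => (dead.add k).contains p) (fun p => p)
            (preds.getD k []) st x).mp hx with h | ⟨z, hz, -, rfl⟩
        · exact I2 x (List.mem_cons_of_mem _ h)
        · have hzl : (z, k) ∈ l := (hpreds k z).mp hz
          rintro ⟨T, hT1, hT2, hzT⟩
          exact hGk ⟨T, hT1, hT2, hT2 (z, k) hzl hzT⟩
      have nI3 : ∀ p ∈ l, (p.2 ∉ K ∨ p.2 ∈ dead.add k) →
          (p.1 ∈ dead.add k ∨ p.1 ∈ (preds.getD k []).foldl
            (fun s p => if (dead.add k).contains p then s else p :: s) st) := by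
        intro p hp' hor
        have hold : (p.2 ∉ K ∨ p.2 ∈ dead) ∨ p.2 = k := by
          rcases hor with h | h
          · exact Or.inl (Or.inl h)
          · rcases (PySem.Set.mem_add dead k p.2).mp h with h' | h'
            · exact Or.inl (Or.inr h')
            · exact Or.inr h'
        rcases hold with hold | hpk
        · rcases I3 p hp' hold with h | h
          · exact Or.inl ((PySem.Set.mem_add dead k p.1).mpr (Or.inl h))
          · rcases List.mem_cons.mp h with h' | h'
            · exact Or.inl ((PySem.Set.mem_add dead k p.1).mpr (Or.inr h'))
            · exact Or.inr ((pvConsIf_mem _ (fun p => p) _ st p.1).mpr (Or.inl h'))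
        · have hpl : p.1 ∈ preds.getD k [] := by
            refine (hpreds k p.1).mpr ?_
            rw [← hpk]
            exact hp'
          by_cases hc : p.1 ∈ dead.add k
          · exact Or.inl hc
          · refine Or.inr ((pvConsIf_mem _ (fun p => p) _ st p.1).mpr
              (Or.inr ⟨p.1, hpl, ?_, rfl⟩))
            rw [← Bool.not_eq_true, PySem.Set.contains_iff]
            exact hc
      exact ih nI1 nI2 nI3

lemma pvBdead_spec (d : PySem.Dict Int Int) :
    (∀ k ∈ pvBdead d, ¬ pvGood d.items k) ∧
    (∀ p ∈ d.items, (p.2 ∉ d.keys ∨ p.2 ∈ pvBdead d) → p.1 ∈ pvBdead d) := by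
  unfold pvBdead
  refine pvBloop_spec d.items d.keys _ _ (pvPreds_mem d.items) _ _ _ _ _
    (fun k hk => by cases hk) ?_ ?_
  · intro k hk
    rcases (pvConsIf_mem (fun p : Int × Int => (PySem.Set.ofList d.keys).contains p.2)
        (fun p => p.1) d.items [] k).mp hk with h | ⟨p, hp, hcf, rfl⟩
    · cases h
    · rintro ⟨T, hT1, hT2, hpT⟩
      have hp2 : p.2 ∉ d.keys := by
        intro hm
        have : (PySem.Set.ofList d.keys).contains p.2 = true :=
          (PySem.Set.contains_iff _ _).mpr ((PySem.Set.mem_ofList _ _).mpr hm)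
        rw [this] at hcf; cases hcf
      exact hp2 (by simpa [PySem.Dict.keys] using hT1 _ (hT2 p hp hpT))
  · intro p hp hor
    rcases hor with h | h
    · refine Or.inr ((pvConsIf_mem (fun p : Int × Int => (PySem.Set.ofList d.keys).contains p.2)
        (fun p => p.1) d.items [] p.1).mpr (Or.inr ⟨p, hp, ?_, rfl⟩))
      rw [← Bool.not_eq_true, PySem.Set.contains_iff, PySem.Set.mem_ofList]
      exact h
    · cases h

-- ===== assembly =====
theorem pv_main (dict1 : List (Int × Int)) : make_closed dict1 = make_closed_alt dict1 := by
  have hn : (((PySem.Dict.ofList dict1).items).map (·.1)).Nodup := by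
    simpa [PySem.Dict.keys] using PySem.Dict.nodup_keys_ofList (ν := Int) dict1
  set d := PySem.Dict.ofList dict1 with hd
  obtain ⟨S, hS1, hS2, hS3, hS4⟩ := pvAloop_spec d.items.length d.items le_rfl hn
  obtain ⟨HB1, HB2⟩ := pvBdead_spec d
  have hA : make_closed dict1 = (pvAloop (PySem.Dict.mk d.items)).items := rfl
  have hB : make_closed_alt dict1
      = d.items.filter (fun p => !(pvBdead d : List Int).contains p.1) := by
    have h0 : make_closed_alt dict1 = ((pvBdead d).foldl (fun dd k => dd.erase k)
        (PySem.Dict.mk d.items)).items := rfl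
    rw [h0, pvErase_foldl_items]
    rfl
  rw [hA, hB, hS1]
  apply List.filter_congr
  intro p hp
  have hkeymem : ∀ x ∈ d.items.map (·.1), x ∈ d.keys := by
    intro x hx; simpa [PySem.Dict.keys] using hx
  by_cases hps : p.1 ∈ S
  · have hnotdead : p.1 ∉ (pvBdead d : List Int) := fun hdd =>
      HB1 p.1 hdd ⟨S, hS2, hS3, hps⟩
    simp [hps, hnotdead]
  · have halive : p.1 ∈ (pvBdead d : List Int) := by
      by_contra hnd'
      apply hps
      refine hS4 ((d.items.map (·.1)).filter (fun x => !(pvBdead d : List Int).contains x))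
        ?_ ?_ p.1 ?_
      · intro x hx; exact (List.mem_filter.mp hx).1
      · intro q hq hqT
        have hq1 : q.1 ∉ (pvBdead d : List Int) := by
          have := (List.mem_filter.mp hqT).2
          simpa [List.contains_iff_mem] using this
        have h21 : q.2 ∈ d.items.map (·.1) := by
          by_contra hc
          exact hq1 (HB2 q hq (Or.inl (fun hm => hc (by simpa [PySem.Dict.keys] using hm))))
        have h22 : q.2 ∉ (pvBdead d : List Int) := fun hc => hq1 (HB2 q hq (Or.inr hc))
        refine List.mem_filter.mpr ⟨h21, ?_⟩
        simpa [List.contains_iff_mem] using h22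
      · refine List.mem_filter.mpr ⟨List.mem_map.mpr ⟨p, hp, rfl⟩, ?_⟩
        simpa [List.contains_iff_mem] using hnd'
    simp [hps, halive]

-- ===== VERDICT (by name: the statement is the Claim_ definition above) =====
theorem make_closed_spec : Claim_equal_make_closed := by
  unfold Claim_equal_make_closed Spec_make_closed
  intro dict1 _
  exact pv_main dict1
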